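-- pv_equiv track=rewrite | github.com/cj495840252/leetcode | 每日推荐一题/793.阶层函数后k个零.py | preimageSizeFZF1
-- ===== SOURCE A (Python) =====
-- from bisect import bisect_left
--
-- def preimageSizeFZF1(k: int) -> int:
--     """官方答案"""
--     def zeta(n: int) -> int:
--         res = 0
--         while n:
--             n //= 5
--             res += n
--         return res
--
--     def nx(k: int) -> int:
--         return bisect_left(range(5 * k), k, key=zeta)
--
--     return nx(k + 1) - nx(k)
-- ===== SOURCE B (Python) =====
-- def preimageSizeFZF1(k: int) -> int:
--     """Greedy base-5 weight decomposition: the counts attained by the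
--     trailing-zero function are exactly sums sum d_i * w_i with digits
--     d_i in 0..4 over weights w_i = (5^i - 1) / 4, and the preimage of an
--     attained count always has size 5.  No zeta evaluations, no search."""
--     if k < 0:
--         return 0
--     ws = []
--     w = 1
--     while w <= k:
--         ws.append(w)
--         w = 5 * w + 1
--     for w in reversed(ws):
--         d = k // w
--         if d > 4:
--             return 0
--         k -= d * w
--     return 5 if k == 0 else 0
-- ===== Notes on version B (the rewrite author's own statement) =====
-- stated objective: alternative
-- what changed: Replaces the two bisect_left binary searches over range(5*k) (each probing the zeta helper logarithmically many times) by a direct greedy digit decomposition of k over the weights that zeta attains at powers of five: k is an attained trailing-zero count iff the forced greedy digits (each bounded by four) exhaust k, and the preimage of an attained count always has size five.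
import Mathlib
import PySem

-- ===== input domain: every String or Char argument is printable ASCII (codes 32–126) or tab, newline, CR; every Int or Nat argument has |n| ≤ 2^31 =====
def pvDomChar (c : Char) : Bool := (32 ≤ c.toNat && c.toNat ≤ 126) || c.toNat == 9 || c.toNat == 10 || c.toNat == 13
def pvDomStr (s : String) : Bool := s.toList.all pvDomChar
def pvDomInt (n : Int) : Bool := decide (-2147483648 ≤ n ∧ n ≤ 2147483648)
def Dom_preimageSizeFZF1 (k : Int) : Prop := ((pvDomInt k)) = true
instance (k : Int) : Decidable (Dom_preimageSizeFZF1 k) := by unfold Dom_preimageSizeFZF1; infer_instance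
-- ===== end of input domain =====

-- B replaces A's two bisect_left binary searches by a greedy base-5 digit decomposition of k
-- over the weights (5^i-1)/4 (the values zeta takes on powers of 5): k is attained iff the
-- forced greedy digits (each at most 4) reduce k to 0, and the preimage then has size 5.


-- ===== PORT A =====
-- zeta: 'res = 0; while n: n //= 5; res += n; return res'.  Python's 'while n' tests n ≠ 0 but
-- would loop forever for n < 0 (n //= 5 has fixpoint -1); A applies zeta only to nonnegative
-- arguments, so the '0 < n' guard merely totalizes the identical loop.
def pvZeta (n : Int) : Int :=
  if h : 0 < n then
    let n' := PySem.Int.floordiv n 5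
    n' + pvZeta n'
  else 0
termination_by n.toNat
decreasing_by
  rw [PySem.Int.floordiv_eq_ediv_of_pos (show (0:Int) < 5 by norm_num)]
  exact (Int.toNat_lt_toNat h).mpr (Int.ediv_lt_of_lt_mul (by norm_num) (by omega))

-- bisect_left(range(N), k, key=zeta) is CPython's loop 'while lo < hi: mid = (lo+hi)//2;
-- if key(a[mid]) < x: lo = mid+1 else: hi = mid; return lo' started at lo=0, hi=len(a);
-- a[mid] = mid exactly, since a = range(0, N, 1) and 0 ≤ mid < N throughout
-- (PySem.List.bisectLeft takes no key function, so the loop is ported by hand).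
def pvBisectGo (k lo hi : Int) : Int :=
  if h : lo < hi then
    let mid := PySem.Int.floordiv (lo + hi) 2
    if pvZeta mid < k then pvBisectGo k (mid + 1) hi else pvBisectGo k lo mid
  else lo
termination_by (hi - lo).toNat
decreasing_by
  · have hb := PySem.Int.floordiv_two_mid_bounds (le_of_lt h)
    rw [PySem.Int.floordiv_eq_ediv_of_pos (show (0:Int) < 2 by norm_num)]
    exact (Int.toNat_lt_toNat (by omega)).mpr (by omega)
  · have hb := PySem.Int.floordiv_two_mid_bounds (le_of_lt h)
    rw [PySem.Int.floordiv_eq_ediv_of_pos (show (0:Int) < 2 by norm_num)]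
    exact (Int.toNat_lt_toNat (by omega)).mpr (by omega)

def preimageSizeFZF1 (k : Int) : Int :=
  -- nx(j) = bisect_left(range(5*j), j, key=zeta); len(range(5*j)) = max (5*j) 0
  let nx := fun (j : Int) => pvBisectGo j 0 (max (5 * j) 0)
  nx (k + 1) - nx k

-- ===== PORT B =====
-- 'ws = []; w = 1; while w <= k: ws.append(w); w = 5*w+1'.  On the call path w is always ≥ 1
-- (it starts at 1 and grows); the '1 ≤ w' conjunct only totalizes the identical loop.
def pvWeightsUp (k w : Int) : List Int :=
  if h : 1 ≤ w ∧ w ≤ k then w :: pvWeightsUp k (5 * w + 1) else []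
termination_by (k + 1 - w).toNat
decreasing_by exact (Int.toNat_lt_toNat (by omega)).mpr (by omega)

-- 'for w in reversed(ws): d = k // w; if d > 4: return 0; k -= d*w' then 'return 5 if k == 0 else 0'
def pvGreedy : List Int → Int → Int
  | [], k => if k = 0 then 5 else 0
  | w :: ws, k =>
    let d := PySem.Int.floordiv k w
    if 4 < d then 0 else pvGreedy ws (k - d * w)

def preimageSizeFZF1_alt (k : Int) : Int :=
  if k < 0 then 0
  else pvGreedy (pvWeightsUp k 1).reverse k

-- ===== PRECONDITION & SPEC =====
def Spec_preimageSizeFZF1 (k : Int) (out : Int) : Prop := out = preimageSizeFZF1_alt k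
instance (k : Int) (out : Int) : Decidable (Spec_preimageSizeFZF1 k out) := by unfold Spec_preimageSizeFZF1; infer_instance

-- ===== CLAIM (what is proved, stated in full; the proofs are below) =====
def Claim_equal_preimageSizeFZF1 : Prop := ∀ (k : Int), Dom_preimageSizeFZF1 k → Spec_preimageSizeFZF1 k (preimageSizeFZF1 k)

-- ===== LEMMAS AND PROOFS =====

-- ---- basic facts about pvZeta ----

theorem pvZeta_nonneg (n : Int) : 0 ≤ pvZeta n := by
  fun_induction pvZeta n with
  | case1 n h ih =>
    have h0 : 0 ≤ PySem.Int.floordiv n 5 := by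
      rw [PySem.Int.floordiv_eq_ediv_of_pos (by norm_num)]; omega
    omega
  | case2 n h => exact le_rfl

theorem pvZeta_nonpos (n : Int) (h : ¬ 0 < n) : pvZeta n = 0 := by
  rw [pvZeta]; simp [h]

theorem pvZeta_zero : pvZeta 0 = 0 := pvZeta_nonpos 0 (by omega)

theorem pvZeta_pos_eq (n : Int) (h : 0 < n) :
    pvZeta n = n / 5 + pvZeta (n / 5) := by
  rw [pvZeta]
  simp only [dif_pos h, PySem.Int.floordiv_eq_ediv_of_pos (show (0:Int) < 5 by norm_num)]

theorem pvZeta_div (n : Int) (h : 0 ≤ n) : pvZeta n = n / 5 + pvZeta (n / 5) := by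
  rcases lt_or_eq_of_le h with h' | h'
  · exact pvZeta_pos_eq n h'
  · rw [← h']; simp [pvZeta_zero]

theorem pvZeta_small (n : Int) (h0 : 0 ≤ n) (h5 : n < 5) : pvZeta n = 0 := by
  rw [pvZeta_div n h0]
  have : n / 5 = 0 := by omega
  rw [this, pvZeta_zero]
  norm_num

-- zeta is constant on each block [5*t, 5*t+5): zeta (5*t + r) = t + zeta t
theorem pvZeta_block (t r : Int) (ht : 0 ≤ t) (hr0 : 0 ≤ r) (hr5 : r < 5) :
    pvZeta (5 * t + r) = t + pvZeta t := by
  by_cases h : 0 < 5 * t + r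
  · rw [pvZeta_pos_eq _ h]
    have hd : (5 * t + r) / 5 = t := by omega
    rw [hd]
  · have ht0 : t = 0 := by omega
    have hr00 : r = 0 := by omega
    subst ht0; subst hr00
    norm_num [pvZeta_zero]

theorem pvZeta_mono' : ∀ N : Nat, ∀ m n : Int, n.toNat ≤ N → 0 ≤ m → m ≤ n → pvZeta m ≤ pvZeta n := by
  intro N
  induction N with
  | zero =>
    intro m n hN hm hmn
    have : m = n := by omega
    subst this; exact le_rfl
  | succ N ih =>
    intro m n hN hm hmn
    by_cases hmp : 0 < m
    · have hnp : 0 < n := lt_of_lt_of_le hmp hmn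
      rw [pvZeta_pos_eq m hmp, pvZeta_pos_eq n hnp]
      have hdiv : m / 5 ≤ n / 5 := by omega
      have h0 : 0 ≤ m / 5 := by omega
      have := ih (m / 5) (n / 5) (by omega) h0 hdiv
      omega
    · rw [pvZeta_nonpos m hmp]; exact pvZeta_nonneg n

theorem pvZeta_mono {m n : Int} (hm : 0 ≤ m) (hmn : m ≤ n) : pvZeta m ≤ pvZeta n :=
  pvZeta_mono' n.toNat m n le_rfl hm hmn

-- ---- the weights w_i = (5^i - 1)/4 = zeta(5^i) ----

def pvWgt : Nat → Int
  | 0 => 0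
  | i + 1 => 5 * pvWgt i + 1

theorem pvWgt_succ (i : Nat) : pvWgt (i + 1) = 5 * pvWgt i + 1 := rfl

theorem pvWgt_nonneg (i : Nat) : 0 ≤ pvWgt i := by
  induction i with
  | zero => exact le_rfl
  | succ i ih => rw [pvWgt_succ]; omega

theorem pvWgt_pos (i : Nat) : 1 ≤ pvWgt (i + 1) := by
  have := pvWgt_nonneg i; rw [pvWgt_succ]; omega

theorem pow_add_pvWgt (i : Nat) : (5:Int) ^ i + pvWgt i = pvWgt (i + 1) := by
  induction i with
  | zero => simp [pvWgt]
  | succ i ih =>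
    have h1 := pvWgt_succ i
    have h2 := pvWgt_succ (i + 1)
    rw [pow_succ]
    linarith [ih]

theorem pow5_pos (i : Nat) : (0:Int) < 5 ^ i := pow_pos (by norm_num) i

-- zeta of n = d*5^(i+1) + n' splits digit-wise (top digit d ≤ 4)
theorem pvZeta_shift : ∀ (i : Nat) (d n : Int), 0 ≤ d → d ≤ 4 → 0 ≤ n → n < 5 ^ (i + 1) →
    pvZeta (d * 5 ^ (i + 1) + n) = d * pvWgt (i + 1) + pvZeta n := by
  intro i
  induction i with
  | zero =>
    intro d n hd0 hd4 hn0 hn5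
    have h5 : (5:Int) ^ 1 = 5 := by norm_num
    rw [h5] at hn5 ⊢
    have hb : pvZeta (5 * d + n) = d + pvZeta d := pvZeta_block d n hd0 hn0 hn5
    rw [show d * 5 + n = 5 * d + n by ring, hb, pvZeta_small d hd0 (by omega),
      pvZeta_small n hn0 hn5]
    simp [pvWgt]
  | succ i ih =>
    intro d n hd0 hd4 hn0 hn5
    have hP : (0:Int) < 5 ^ (i + 1) := pow5_pos (i + 1)
    have hps : (5:Int) ^ (i + 2) = 5 * 5 ^ (i + 1) := by ring
    have hN0 : 0 ≤ d * 5 ^ (i + 2) + n := by positivity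
    rw [pvZeta_div _ hN0]
    have hdiv : (d * 5 ^ (i + 2) + n) / 5 = d * 5 ^ (i + 1) + n / 5 := by
      rw [show d * 5 ^ (i + 2) + n = n + 5 * (d * 5 ^ (i + 1)) by rw [hps]; ring,
        Int.add_mul_ediv_left n _ (by norm_num)]
      ring
    rw [hdiv]
    have hn5' : n / 5 < 5 ^ (i + 1) := by
      rw [hps] at hn5; omega
    rw [ih d (n / 5) hd0 hd4 (by omega) hn5', pvZeta_div n hn0,
      ← pow_add_pvWgt (i + 1)]
    ring

-- zeta is bounded on [0, 5^(i+1)) by wgt(i+1) - 1 - i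
theorem pvZeta_bound : ∀ (i : Nat) (n : Int), 0 ≤ n → n < 5 ^ (i + 1) →
    pvZeta n ≤ pvWgt (i + 1) - 1 - (i : Int) := by
  intro i
  induction i with
  | zero =>
    intro n hn0 hn5
    rw [pvZeta_small n hn0 (by norm_num at hn5 ⊢; omega)]
    simp [pvWgt]
  | succ i ih =>
    intro n hn0 hn5
    have hps : (5:Int) ^ (i + 2) = 5 * 5 ^ (i + 1) := by ring
    rw [pvZeta_div n hn0]
    have h1 : n / 5 < 5 ^ (i + 1) := by rw [hps] at hn5; omega
    have h2 := ih (n / 5) (by omega) h1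
    have h3 : n / 5 ≤ 5 ^ (i + 1) - 1 := by omega
    have h4 := pow_add_pvWgt (i + 1)
    push_cast
    omega

theorem pvZeta_pow (i : Nat) : pvZeta (5 ^ (i + 1)) = pvWgt (i + 1) := by
  have := pvZeta_shift i 1 0 (by norm_num) (by norm_num) le_rfl (pow5_pos (i + 1))
  simpa [pvZeta_zero] using this

-- ---- the descending weight list the greedy loop walks ----

def pvDW : Nat → List Int
  | 0 => []
  | i + 1 => pvWgt (i + 1) :: pvDW i

-- greedy succeeds on every attained value (witness below 5^(i+1))
theorem pvGreedy_complete : ∀ (i : Nat) (k n : Int), 0 ≤ n → n < 5 ^ (i + 1) →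
    pvZeta n = k → pvGreedy (pvDW i) k = 5 := by
  intro i
  induction i with
  | zero =>
    intro k n hn0 hn5 hz
    have : k = 0 := by rw [← hz, pvZeta_small n hn0 (by norm_num at hn5 ⊢; omega)]
    simp [pvDW, pvGreedy, this]
  | succ i ih =>
    intro k n hn0 hn5 hz
    have hP : (0:Int) < 5 ^ (i + 1) := pow5_pos (i + 1)
    have hW : (1:Int) ≤ pvWgt (i + 1) := pvWgt_pos i
    set P := (5:Int) ^ (i + 1) with hPdef
    set W := pvWgt (i + 1) with hWdef
    have hps : (5:Int) ^ (i + 2) = 5 * P := by rw [hPdef]; ring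
    -- split off the top digit of n
    set d := n / P with hddef
    set n' := n % P with hn'def
    have hd0 : 0 ≤ d := Int.ediv_nonneg hn0 (le_of_lt hP)
    have hd4 : d ≤ 4 := by
      have : n / P < 5 := Int.ediv_lt_of_lt_mul hP (by rw [hps] at hn5; linarith)
      omega
    have hn'0 : 0 ≤ n' := Int.emod_nonneg n (by omega)
    have hn'P : n' < P := Int.emod_lt_of_pos n hP
    have hnsplit : n = d * P + n' := by
      have h := Int.mul_ediv_add_emod n P
      rw [hddef, hn'def]
      linarith [h, mul_comm P (n / P)]
    have hzsplit : pvZeta n = d * W + pvZeta n' :=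
      hnsplit ▸ pvZeta_shift i d n' hd0 hd4 hn'0 hn'P
    -- the greedy digit equals d
    have hzn'0 : 0 ≤ pvZeta n' := pvZeta_nonneg n'
    have hzn'W : pvZeta n' < W := by
      have := pvZeta_bound i n' hn'0 hn'P
      omega
    have hkd : k / W = d := by
      rw [← hz, hzsplit, show d * W + pvZeta n' = pvZeta n' + W * d by ring,
        Int.add_mul_ediv_left _ _ (by omega : W ≠ 0),
        Int.ediv_eq_zero_of_lt hzn'0 hzn'W]
      ring
    have hfd : PySem.Int.floordiv k W = d := by
      rw [PySem.Int.floordiv_eq_ediv_of_pos (by omega), hkd]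
    show pvGreedy (W :: pvDW i) k = 5
    rw [pvGreedy]
    simp only [hfd, if_neg (show ¬ 4 < d by omega)]
    have : k - d * W = pvZeta n' := by rw [← hz, hzsplit]; ring
    rw [this]
    exact ih (pvZeta n') n' hn'0 hn'P rfl

-- greedy fails on every unattained value
theorem pvGreedy_sound : ∀ (i : Nat) (k : Int), 0 ≤ k →
    (∀ n, 0 ≤ n → n < 5 ^ (i + 1) → pvZeta n ≠ k) → pvGreedy (pvDW i) k = 0 := by
  intro i
  induction i with
  | zero =>
    intro k hk0 hno
    have : k ≠ 0 := by
      intro h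
      exact hno 0 le_rfl (by norm_num) (by rw [pvZeta_zero, h])
    simp [pvDW, pvGreedy, this]
  | succ i ih =>
    intro k hk0 hno
    have hP : (0:Int) < 5 ^ (i + 1) := pow5_pos (i + 1)
    have hW : (1:Int) ≤ pvWgt (i + 1) := pvWgt_pos i
    set P := (5:Int) ^ (i + 1) with hPdef
    set W := pvWgt (i + 1) with hWdef
    have hps : (5:Int) ^ (i + 2) = 5 * P := by rw [hPdef]; ring
    set d := k / W with hddef
    have hfd : PySem.Int.floordiv k W = d := PySem.Int.floordiv_eq_ediv_of_pos (by omega)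
    show pvGreedy (W :: pvDW i) k = 0
    rw [pvGreedy]
    simp only [hfd]
    by_cases hd4 : 4 < d
    · rw [if_pos hd4]
    · rw [if_neg hd4]
      have hd0 : 0 ≤ d := Int.ediv_nonneg hk0 (by omega)
      have hrem : k - d * W = k % W := by
        rw [hddef, Int.emod_def]; ring
      have hr0 : 0 ≤ k - d * W := by rw [hrem]; exact Int.emod_nonneg k (by omega)
      have hrW : k - d * W < W := by rw [hrem]; exact Int.emod_lt_of_pos k (by omega)
      refine ih (k - d * W) hr0 ?_
      intro n' hn'0 hn'P hz
      refine hno (d * P + n') (by positivity) ?_ ?_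
      · rw [hps]; nlinarith
      · rw [pvZeta_shift i d n' hd0 (by omega) hn'0 hn'P, hz]; ring

-- the while loop produces exactly the weights pvWgt (i+1) … pvWgt j that are ≤ k, reversed
theorem pvWeightsUp_spec : ∀ (N : Nat) (i : Nat) (k : Int), (k + 1 - pvWgt (i + 1)).toNat ≤ N →
    ∃ j : Nat, i ≤ j ∧ k < pvWgt (j + 1) ∧
      (pvWeightsUp k (pvWgt (i + 1))).reverse ++ pvDW i = pvDW j := by
  intro N
  induction N with
  | zero =>
    intro i k hN
    have hstop : ¬ (1 ≤ pvWgt (i + 1) ∧ pvWgt (i + 1) ≤ k) := by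
      intro ⟨h1, h2⟩; omega
    rw [pvWeightsUp, dif_neg hstop]
    exact ⟨i, le_rfl, by have := pvWgt_pos i; omega, by simp⟩
  | succ N ih =>
    intro i k hN
    by_cases hle : pvWgt (i + 1) ≤ k
    · rw [pvWeightsUp, dif_pos ⟨pvWgt_pos i, hle⟩]
      rw [(pvWgt_succ (i + 1)).symm]
      have hWp := pvWgt_pos i
      have hWp2 := pvWgt_pos (i + 1)
      have hgrow : pvWgt (i + 1 + 1) = 5 * pvWgt (i + 1) + 1 := pvWgt_succ (i + 1)
      obtain ⟨j, hij, hkj, heq⟩ := ih (i + 1) k (by omega)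
      refine ⟨j, by omega, hkj, ?_⟩
      rw [List.reverse_cons, List.append_assoc]
      exact heq
    · rw [pvWeightsUp, dif_neg (by intro ⟨_, h⟩; exact hle h)]
      exact ⟨i, le_rfl, by omega, by simp⟩

-- ---- characterisation of A's binary searches ----

theorem pvZeta_5k_ge (k : Int) (hk : 0 ≤ k) : k ≤ pvZeta (5 * k) := by
  have h := pvZeta_block k 0 hk le_rfl (by norm_num)
  rw [add_zero] at h
  have := pvZeta_nonneg k
  omega

-- "r is the least nonnegative n with zeta n ≥ k"
def IsLeast5 (k r : Int) : Prop :=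
  0 ≤ r ∧ k ≤ pvZeta r ∧ ∀ m, 0 ≤ m → m < r → pvZeta m < k

-- A's bisect loop computes the least witness, given one at hi and none below lo
theorem pvBisectGo_spec (k : Int) : ∀ N : Nat, ∀ lo hi : Int, (hi - lo).toNat ≤ N →
    0 ≤ lo → lo ≤ hi → k ≤ pvZeta hi → (∀ m, 0 ≤ m → m < lo → pvZeta m < k) →
    IsLeast5 k (pvBisectGo k lo hi) := by
  intro N
  induction N with
  | zero =>
    intro lo hi hN h0 hlh hhi hinv
    have he : lo = hi := by omega
    rw [pvBisectGo, dif_neg (by omega)]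
    exact ⟨h0, he ▸ hhi, hinv⟩
  | succ N ih =>
    intro lo hi hN h0 hlh hhi hinv
    rw [pvBisectGo]
    by_cases h : lo < hi
    · rw [dif_pos h]
      have hb := PySem.Int.floordiv_two_mid_bounds (le_of_lt h)
      have h5 : PySem.Int.floordiv (lo + hi) 2 = (lo + hi) / 2 :=
        PySem.Int.floordiv_eq_ediv_of_pos (by omega)
      rw [h5] at hb
      set mid := PySem.Int.floordiv (lo + hi) 2 with hmid
      rw [h5] at hmid
      have hmlo : lo ≤ mid := by omega
      have hmhi : mid < hi := by omega
      by_cases hz : pvZeta mid < k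
      · rw [if_pos hz]
        exact ih (mid + 1) hi (by omega) (by omega) (by omega) hhi
          (fun m hm hmlt => lt_of_le_of_lt (pvZeta_mono hm (by omega)) hz)
      · rw [if_neg hz]
        exact ih lo mid (by omega) h0 (by omega) (by omega) hinv
    · rw [dif_neg h]
      have he : lo = hi := by omega
      exact ⟨h0, he ▸ hhi, hinv⟩

theorem isLeast5_unique {k r r' : Int} (h : IsLeast5 k r) (h' : IsLeast5 k r') : r = r' := by
  obtain ⟨hr0, hrk, hrm⟩ := h
  obtain ⟨hr0', hrk', hrm'⟩ := h'
  rcases lt_trichotomy r r' with hlt | he | hgt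
  · have := hrm' r hr0 hlt; omega
  · exact he
  · have := hrm r' hr0' hgt; omega

-- the successor step: the least witness for k+1 is 5 beyond (k attained) or equal (k skipped)
theorem isLeast5_succ {k r r' : Int} (hk : 0 ≤ k) (h : IsLeast5 k r) (h' : IsLeast5 (k + 1) r') :
    r' - r = if pvZeta r = k then 5 else 0 := by
  obtain ⟨hr0, hrk, hrm⟩ := h
  set t := r / 5 with htdef
  have ht0 : 0 ≤ t := by omega
  have hts : 5 * t ≤ r ∧ r < 5 * t + 5 := by omega
  by_cases he : pvZeta r = k
  · rw [if_pos he]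
    have hmul : r = 5 * t := by
      by_contra hne
      have hlt : 5 * t < r := by omega
      have := hrm (5 * t) (by omega) hlt
      have hb : pvZeta (5 * t + (r - 5 * t)) = t + pvZeta t :=
        pvZeta_block t (r - 5 * t) ht0 (by omega) (by omega)
      have hb0 : pvZeta (5 * t + 0) = t + pvZeta t := pvZeta_block t 0 ht0 le_rfl (by norm_num)
      rw [show 5 * t + (r - 5 * t) = r by ring] at hb
      rw [add_zero] at hb0
      omega
    have hval : t + pvZeta t = k := by
      have hb0 : pvZeta (5 * t + 0) = t + pvZeta t := pvZeta_block t 0 ht0 le_rfl (by norm_num)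
      rw [add_zero, ← hmul] at hb0
      omega
    have hnext : IsLeast5 (k + 1) (r + 5) := by
      refine ⟨by omega, ?_, ?_⟩
      · have hb : pvZeta (5 * (t + 1) + 0) = (t + 1) + pvZeta (t + 1) :=
          pvZeta_block (t + 1) 0 (by omega) le_rfl (by norm_num)
        rw [add_zero] at hb
        have hmt : pvZeta t ≤ pvZeta (t + 1) := pvZeta_mono ht0 (by omega)
        have : r + 5 = 5 * (t + 1) := by omega
        rw [this, hb]
        omega
      · intro m hm hmlt
        by_cases hcase : m < r
        · have := hrm m hm hcase; omega
        · have hb : pvZeta (5 * t + (m - 5 * t)) = t + pvZeta t :=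
            pvZeta_block t (m - 5 * t) ht0 (by omega) (by omega)
          rw [show 5 * t + (m - 5 * t) = m by ring] at hb
          omega
    have := isLeast5_unique h' hnext
    omega
  · rw [if_neg he]
    have hnext : IsLeast5 (k + 1) r := by
      refine ⟨hr0, by omega, fun m hm hmlt => ?_⟩
      have := hrm m hm hmlt; omega
    have := isLeast5_unique h' hnext
    omega

-- the least witness attains k exactly when some n does
theorem least_eq_iff {k r : Int} (h : IsLeast5 k r) :
    pvZeta r = k ↔ ∃ n, 0 ≤ n ∧ pvZeta n = k := by
  obtain ⟨hr0, hrk, hrm⟩ := h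
  constructor
  · exact fun he => ⟨r, hr0, he⟩
  · rintro ⟨n, hn0, hz⟩
    have hrn : r ≤ n := by
      by_contra hlt
      have := hrm n hn0 (by omega)
      omega
    have := pvZeta_mono hr0 hrn
    omega

-- B returns 5 on attained k, 0 otherwise
theorem alt_char (k : Int) (hk : 0 ≤ k) :
    ((∃ n, 0 ≤ n ∧ pvZeta n = k) → preimageSizeFZF1_alt k = 5) ∧
    ((¬ ∃ n, 0 ≤ n ∧ pvZeta n = k) → preimageSizeFZF1_alt k = 0) := by
  obtain ⟨j, -, hkj, heq⟩ :=
    pvWeightsUp_spec (k + 1 - pvWgt 1).toNat 0 k le_rfl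
  have hW1 : pvWgt 1 = 1 := by simp [pvWgt]
  rw [hW1] at heq
  have hlist : (pvWeightsUp k 1).reverse = pvDW j := by
    simpa [pvDW] using heq
  have hbody : preimageSizeFZF1_alt k = pvGreedy (pvDW j) k := by
    rw [preimageSizeFZF1_alt, if_neg (by omega), hlist]
  constructor
  · rintro ⟨n, hn0, hz⟩
    have hnb : n < 5 ^ (j + 1) := by
      by_contra hge
      have h1 : pvZeta (5 ^ (j + 1)) ≤ pvZeta n :=
        pvZeta_mono (le_of_lt (pow5_pos (j + 1))) (by omega)
      rw [pvZeta_pow j] at h1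
      omega
    rw [hbody]
    exact pvGreedy_complete j k n hn0 hnb hz
  · intro hA
    rw [hbody]
    exact pvGreedy_sound j k hk (fun n hn0 hnb hz => hA ⟨n, hn0, hz⟩)

-- ===== VERDICT (by name: the statement is the Claim_ definition above) =====
theorem preimageSizeFZF1_spec : Claim_equal_preimageSizeFZF1 := by
  intro k _
  show pvBisectGo (k + 1) 0 (max (5 * (k + 1)) 0) - pvBisectGo k 0 (max (5 * k) 0)
      = preimageSizeFZF1_alt k
  by_cases hk : 0 ≤ k
  · rw [max_eq_left (show (0:Int) ≤ 5 * (k + 1) by omega),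
      max_eq_left (show (0:Int) ≤ 5 * k by omega)]
    have hP : IsLeast5 k (pvBisectGo k 0 (5 * k)) :=
      pvBisectGo_spec k (5 * k).toNat 0 (5 * k) (by omega) le_rfl (by omega)
        (pvZeta_5k_ge k hk) (by intro m hm hml; omega)
    have hP' : IsLeast5 (k + 1) (pvBisectGo (k + 1) 0 (5 * (k + 1))) :=
      pvBisectGo_spec (k + 1) (5 * (k + 1)).toNat 0 (5 * (k + 1)) (by omega) le_rfl (by omega)
        (pvZeta_5k_ge (k + 1) (by omega)) (by intro m hm hml; omega)
    have hdiff := isLeast5_succ hk hP hP'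
    have halt := alt_char k hk
    by_cases hA : ∃ n, 0 ≤ n ∧ pvZeta n = k
    · rw [halt.1 hA]
      rw [if_pos ((least_eq_iff hP).mpr hA)] at hdiff
      omega
    · rw [halt.2 hA]
      have hne : pvZeta (pvBisectGo k 0 (5 * k)) ≠ k := fun he => hA ((least_eq_iff hP).mp he)
      rw [if_neg hne] at hdiff
      omega
  · rw [max_eq_right (show 5 * (k + 1) ≤ (0:Int) by omega),
      max_eq_right (show 5 * k ≤ (0:Int) by omega)]
    rw [pvBisectGo, dif_neg (by omega), pvBisectGo, dif_neg (by omega)]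
    rw [preimageSizeFZF1_alt, if_pos (by omega)]
    norm_num
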